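-- pv_equiv track=rewrite | github.com/soupglasses/advent-of-code | 2021/day_04.py | find_bingo_winner
-- ===== SOURCE A (Python) =====
-- BingoNumbers = list[int]
--
-- Board = list[tuple[int, ...]]
--
-- def transpose(lst: list) -> list:
--     return list(zip(*lst))
--
-- def check_board(winning_nums: BingoNumbers, board: Board) -> bool:
--     for line in board + transpose(board):
--         if all(num in winning_nums for num in line):
--             return True
--     return False
--
-- def find_bingo_winner(
--     bingo_numbers: BingoNumbers, boards: list[Board]
-- ) -> list[tuple[BingoNumbers, Board]]:
--     winning_nums = []
--     winning_boards = []
--     for bingo_number in bingo_numbers: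
--         winning_nums.append(bingo_number)
--         done_boards = list(map(lambda x: x[1], winning_boards))
--         for board in [board for board in boards if board not in done_boards]:
--             if check_board(winning_nums, board):
--                 winning_boards.append((list(winning_nums), board))
--     return winning_boards
-- ===== SOURCE B (Python) =====
-- def find_bingo_winner(bingo_numbers, boards):
--     n = len(bingo_numbers)
--     first = {}
--     for i, num in enumerate(bingo_numbers):
--         if num not in first:
--             first[num] = i
--
--     def win_time(board):
--         width = min((len(row) for row in board), default=0)
--         lines = [list(row) for row in board]
--         lines += [[row[j] for row in board] for j in range(width)]
--         best = n
--         for line in lines: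
--             t = 0
--             for v in line:
--                 t = max(t, first.get(v, n))
--             best = min(best, t)
--         return best
--
--     buckets = {}
--     for board in boards:
--         t = win_time(board)
--         if t < n:
--             buckets.setdefault(t, []).append(board)
--
--     result = []
--     for t in range(n):
--         boards_t = buckets.get(t)
--         if boards_t:
--             prefix = bingo_numbers[: t + 1]
--             for board in boards_t:
--                 result.append((prefix, board))
--     return result
-- ===== Notes on version B (the rewrite author's own statement) =====
-- stated objective: faster
-- what changed: Instead of re-checking every not-yet-won board against the growing prefix after each drawn number, B builds a first-occurrence index map once, computes each board's winning time in closed form (max of first-occurrence indices over each row/column line, min over lines), buckets boards by that time and emits the buckets in order.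
import Mathlib
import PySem

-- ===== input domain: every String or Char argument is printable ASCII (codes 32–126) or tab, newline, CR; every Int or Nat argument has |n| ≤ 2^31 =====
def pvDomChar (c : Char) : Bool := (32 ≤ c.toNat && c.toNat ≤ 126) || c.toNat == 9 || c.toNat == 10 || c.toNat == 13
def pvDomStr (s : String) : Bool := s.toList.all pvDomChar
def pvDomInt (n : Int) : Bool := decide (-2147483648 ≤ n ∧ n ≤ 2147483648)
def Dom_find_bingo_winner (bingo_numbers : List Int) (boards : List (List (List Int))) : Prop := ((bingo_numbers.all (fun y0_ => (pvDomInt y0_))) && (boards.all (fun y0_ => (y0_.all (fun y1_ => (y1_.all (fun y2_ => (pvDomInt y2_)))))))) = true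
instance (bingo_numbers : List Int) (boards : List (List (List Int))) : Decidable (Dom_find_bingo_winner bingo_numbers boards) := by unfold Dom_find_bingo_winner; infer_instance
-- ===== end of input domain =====

-- B replaces A's repeated re-check of every still-open board after every drawn number by a single
-- closed-form "winning time" per board (first-occurrence index map + max over each line, min over lines)
-- and a bucket dictionary keyed by that time; objective: faster.

-- ===== PORT A =====
-- zip(*lst): keep taking heads while every row is nonempty (exactly Python's zip truncation)
def transposeA : List (List Int) → List (List Int)
  | [] => []
  | r :: rs =>
    if h : (r :: rs).all (fun row => !row.isEmpty) then
      (r :: rs).map (fun row => row.headD 0) :: transposeA ((r :: rs).map (fun row => row.tail))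
    else []
termination_by lst => (lst.headD []).length
decreasing_by
  simp only [List.all_cons, Bool.and_eq_true, Bool.not_eq_eq_eq_not, Bool.not_true,
    List.isEmpty_eq_false_iff] at h
  simp only [List.map_cons, List.headD_cons, List.length_tail]
  cases r with
  | nil => exact absurd rfl h.1
  | cons a t => simp

def check_board (winning_nums : List Int) (board : List (List Int)) : Bool :=
  (board ++ transposeA board).any (fun line => line.all (fun num => winning_nums.contains num))

def find_bingo_winner (bingo_numbers : List Int) (boards : List (List (List Int))) : List (List Int × List (List Int)) :=
  (bingo_numbers.foldl
    (fun (st : List Int × List (List Int × List (List Int))) bingo_number =>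
      let winning_nums := st.1 ++ [bingo_number]
      let done_boards := st.2.map (fun x => x.2)
      let winning_boards :=
        (boards.filter (fun board => !done_boards.contains board)).foldl
          (fun acc board =>
            if check_board winning_nums board then acc ++ [(winning_nums, board)] else acc)
          st.2
      (winning_nums, winning_boards))
    ([], [])).2

-- ===== PORT B =====
-- first[num] = index of first occurrence
def fbw_first (bingo_numbers : List Int) : PySem.Dict Int Int :=
  (PySem.List.enumerate bingo_numbers 0).foldl
    (fun first p => if first.contains p.2 then first else first.insert p.2 p.1)
    PySem.Dict.empty

-- j runs over range(width), width ≤ len(row): the pyGetD default 0 is unreachable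
def win_time (n : Int) (first : PySem.Dict Int Int) (board : List (List Int)) : Int :=
  let width : Int := PySem.List.minD (board.map (fun row => (row.length : Int))) id 0
  let lines : List (List Int) :=
    board.map (fun row => row) ++
      (PySem.List.pyRange 0 width 1).map (fun j => board.map (fun row => PySem.List.pyGetD row j 0))
  lines.foldl
    (fun best line => min best (line.foldl (fun t v => max t (first.getD v n)) 0))
    n

def find_bingo_winner_alt (bingo_numbers : List Int) (boards : List (List (List Int))) : List (List Int × List (List Int)) :=
  let n : Int := bingo_numbers.length
  let first := fbw_first bingo_numbers
  let buckets : PySem.Dict Int (List (List (List Int))) :=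
    boards.foldl
      (fun buckets board =>
        let t := win_time n first board
        if t < n then buckets.modify t [] (fun l => l ++ [board]) else buckets)
      PySem.Dict.empty
  (PySem.List.pyRange 0 n 1).foldl
    (fun result t =>
      match buckets.get? t with
      | none => result
      | some boards_t =>
        if boards_t.isEmpty then result
        else result ++ boards_t.map (fun board => (PySem.List.slice bingo_numbers none (some (t + 1)), board)))
    []

-- ===== PRECONDITION & SPEC =====
def Spec_find_bingo_winner (bingo_numbers : List Int) (boards : List (List (List Int))) (out : List (List Int × List (List Int))) : Prop := out = find_bingo_winner_alt bingo_numbers boards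
instance (bingo_numbers : List Int) (boards : List (List (List Int))) (out : List (List Int × List (List Int))) : Decidable (Spec_find_bingo_winner bingo_numbers boards out) := by unfold Spec_find_bingo_winner; infer_instance

-- ===== CLAIM (what is proved, stated in full; the proofs are below) =====
def Claim_equal_find_bingo_winner : Prop := ∀ (bingo_numbers : List Int) (boards : List (List (List Int))), Dom_find_bingo_winner bingo_numbers boards → Spec_find_bingo_winner bingo_numbers boards (find_bingo_winner bingo_numbers boards)

-- ===== LEMMAS AND PROOFS =====

/-- `check_board` on the length-`k` prefix of the drawn numbers. -/
def chkB (ns : List Int) (k : Nat) (b : List (List Int)) : Bool := check_board (ns.take k) b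

/-- board `b` wins exactly when the `(j+1)`-st number is drawn. -/
def winsAtB (ns : List Int) (j : Nat) (b : List (List Int)) : Bool :=
  chkB ns (j + 1) b && (j == 0 || !chkB ns j b)

/-- winners listed by winning step, within a step in board order: the common normal form. -/
def canonC (ns : List Int) (boards : List (List (List Int))) : List (List Int × List (List Int)) :=
  (List.range ns.length).flatMap (fun j =>
    (boards.filter (winsAtB ns j)).map (fun b => (ns.take (j + 1), b)))

lemma check_mono {l1 l2 : List Int} (b : List (List Int)) (h : ∀ x ∈ l1, x ∈ l2)
    (hc : check_board l1 b = true) : check_board l2 b = true := by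
  simp only [check_board, List.any_eq_true, List.all_eq_true] at hc ⊢
  obtain ⟨line, hl, hall⟩ := hc
  refine ⟨line, hl, fun v hv => ?_⟩
  have := hall v hv
  simp only [List.contains_iff_mem] at this ⊢
  exact h _ this

lemma chk_mono {ns : List Int} {i k : Nat} (b : List (List Int)) (hik : i ≤ k)
    (hc : chkB ns i b = true) : chkB ns k b = true := by
  simp only [chkB] at hc ⊢
  refine check_mono b (fun x hx => ?_) hc
  have h1 : ns.take i = (ns.take k).take i := by rw [List.take_take, Nat.min_eq_left hik]
  rw [h1] at hx
  exact List.take_subset _ _ hx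

lemma exists_winsAt_iff (ns : List Int) (k : Nat) (b : List (List Int)) :
    (∃ j, j < k ∧ winsAtB ns j b = true) ↔ (0 < k ∧ chkB ns k b = true) := by
  constructor
  · rintro ⟨j, hjk, hw⟩
    simp only [winsAtB, Bool.and_eq_true] at hw
    exact ⟨by omega, chk_mono b (by omega) hw.1⟩
  · rintro ⟨hk, hc⟩
    have hP : ∃ j, chkB ns (j + 1) b = true := ⟨k - 1, by rwa [Nat.sub_add_cancel hk]⟩
    refine ⟨Nat.find hP, ?_, ?_⟩
    · have := Nat.find_min' hP (m := k - 1) (by rwa [Nat.sub_add_cancel hk])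
      omega
    · simp only [winsAtB, Bool.and_eq_true, Bool.or_eq_true, beq_iff_eq, Bool.not_eq_true']
      refine ⟨Nat.find_spec hP, ?_⟩
      by_cases h0 : Nat.find hP = 0
      · exact Or.inl h0
      · refine Or.inr ?_
        have hmin := Nat.find_min hP (m := Nat.find hP - 1) (by omega)
        have heq : Nat.find hP - 1 + 1 = Nat.find hP := by omega
        rw [heq] at hmin
        simpa using hmin

lemma winsAtB_take_stable (ns : List Int) (x : Int) {j : Nat} (hj : j < ns.length)
    (b : List (List Int)) : winsAtB (ns ++ [x]) j b = winsAtB ns j b := by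
  have h1 : (ns ++ [x]).take (j + 1) = ns.take (j + 1) := List.take_append_of_le_length (by omega)
  have h2 : (ns ++ [x]).take j = ns.take j := List.take_append_of_le_length (by omega)
  simp [winsAtB, chkB, h1, h2]

lemma canonC_map_snd_mem (ns : List Int) (boards : List (List (List Int))) (b : List (List Int)) :
    (b ∈ (canonC ns boards).map (fun x => x.2)) ↔
      (∃ j, j < ns.length ∧ winsAtB ns j b = true ∧ b ∈ boards) := by
  simp only [canonC, List.map_flatMap, List.map_map, List.mem_flatMap, List.mem_range]
  constructor
  · rintro ⟨j, hj, hm⟩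
    simp only [List.mem_map, List.mem_filter, Function.comp] at hm
    obtain ⟨b', ⟨hb', hw⟩, rfl⟩ := hm
    exact ⟨j, hj, hw, hb'⟩
  · rintro ⟨j, hj, hw, hb⟩
    refine ⟨j, hj, ?_⟩
    simp only [List.mem_map, List.mem_filter, Function.comp]
    exact ⟨b, ⟨hb, hw⟩, rfl⟩

lemma canonC_append (ns : List Int) (x : Int) (boards : List (List (List Int))) :
    canonC (ns ++ [x]) boards =
      canonC ns boards ++
        (boards.filter (winsAtB (ns ++ [x]) ns.length)).map (fun b => (ns ++ [x], b)) := by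
  simp only [canonC, List.length_append, List.length_cons, List.length_nil, Nat.zero_add]
  rw [List.range_succ, List.flatMap_append]
  congr 1
  · refine List.flatMap_congr (fun j hj => ?_)
    have hj' : j < ns.length := List.mem_range.mp hj
    rw [List.filter_congr (fun b _ => winsAtB_take_stable ns x hj' b),
      List.take_append_of_le_length (by omega)]
  · simp [List.take_of_length_le (by simp : (ns ++ [x]).length ≤ ns.length + 1)]

lemma A_loop (boards : List (List (List Int))) (ns : List Int) :
    ns.foldl
      (fun (st : List Int × List (List Int × List (List Int))) bingo_number =>
        let winning_nums := st.1 ++ [bingo_number]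
        let done_boards := st.2.map (fun x => x.2)
        let winning_boards :=
          (boards.filter (fun board => !done_boards.contains board)).foldl
            (fun acc board =>
              if check_board winning_nums board then acc ++ [(winning_nums, board)] else acc)
            st.2
        (winning_nums, winning_boards))
      ([], []) = (ns, canonC ns boards) := by
  induction ns using List.reverseRecOn with
  | nil => simp [canonC]
  | append_singleton ns x ih =>
    rw [List.foldl_append, ih, List.foldl_cons, List.foldl_nil]
    dsimp only
    refine Prod.ext rfl ?_
    dsimp only
    rw [PySem.List.foldl_append_if (fun board => check_board (ns ++ [x]) board)
      (fun board => (ns ++ [x], board)), List.filter_filter, canonC_append]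
    congr 1
    refine congrArg _ (List.filter_congr (fun b hb => ?_))
    have hmem := canonC_map_snd_mem ns boards b
    have hex := exists_winsAt_iff ns ns.length b
    have hfull : ns.take ns.length = ns := List.take_length
    have h1 : (ns ++ [x]).take (ns.length + 1) = ns ++ [x] :=
      List.take_of_length_le (by simp)
    have h2 : (ns ++ [x]).take ns.length = ns := by
      rw [List.take_append_of_le_length (le_refl _), hfull]
    have hqb : ((canonC ns boards).map (fun x => x.2)).contains b =
        decide (0 < ns.length ∧ check_board ns b = true) := by
      refine Bool.eq_iff_iff.mpr ?_
      rw [decide_eq_true_iff]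
      have hm' : b ∈ (canonC ns boards).map (fun x => x.2) ↔
          (0 < ns.length ∧ check_board ns b = true) := by
        rw [hmem]
        constructor
        · rintro ⟨j, hj, hw, _⟩
          have := hex.mp ⟨j, hj, hw⟩
          simpa [chkB, hfull] using this
        · intro hc
          obtain ⟨j, hj, hw⟩ := hex.mpr (by simpa [chkB, hfull] using hc)
          exact ⟨j, hj, hw, hb⟩
      simpa using hm'
    have hd : decide (0 < ns.length) = !(ns.length == 0) := by
      rw [Bool.eq_iff_iff]
      simp [Nat.pos_iff_ne_zero]
    simp only [winsAtB, chkB, h1, h2, hqb]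
    cases hC : check_board ns b <;> cases hP : check_board (ns ++ [x]) b <;>
      by_cases hl : ns.length = 0 <;> simp [hC, hP, hl, hd]

lemma A_eq_canonC (ns : List Int) (boards : List (List (List Int))) :
    find_bingo_winner ns boards = canonC ns boards := by
  unfold find_bingo_winner
  rw [A_loop]

lemma dict_contains_iff (d : PySem.Dict Int Int) (v : Int) :
    d.contains v = true ↔ (d.get? v).isSome = true := by
  simp [PySem.Dict.contains, PySem.Dict.get?, List.any_eq_true, List.find?_isSome]

lemma fbw_first_get? (ns : List Int) (s : Int) (d : PySem.Dict Int Int) (v : Int) :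
    ((PySem.List.enumerate ns s).foldl
        (fun first p => if first.contains p.2 then first else first.insert p.2 p.1) d).get? v =
      ((d.get? v).orElse (fun _ => (ns.idxOf? v).map (fun i => s + (i : Int)))) := by
  induction ns generalizing s d with
  | nil =>
    simp only [PySem.List.enumerate, List.foldl_nil, List.idxOf?_nil, Option.map_none]
    cases d.get? v <;> rfl
  | cons y ns ih =>
    rw [PySem.List.enumerate_cons, List.foldl_cons]
    by_cases hcon : d.contains y
    · rw [if_pos hcon, ih]
      by_cases hv : v = y
      · subst hv
        obtain ⟨w, hw⟩ := Option.isSome_iff_exists.mp ((dict_contains_iff d v).mp hcon)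
        simp [hw, Option.orElse]
      · rw [List.idxOf?_cons, if_neg (by simpa using (Ne.symm hv))]
        cases hg : d.get? v with
        | some w => simp [Option.orElse]
        | none =>
          simp only [Option.orElse]
          cases List.idxOf? v ns <;> simp <;> push_cast <;> ring
    · rw [if_neg hcon, ih]
      by_cases hv : v = y
      · subst hv
        rw [PySem.Dict.get?_insert_self]
        have hnone : d.get? v = none := by
          cases hg : d.get? v with
          | none => rfl
          | some w => exact absurd ((dict_contains_iff d v).mpr (by simp [hg])) hcon
        rw [List.idxOf?_cons, if_pos (by simp)]
        simp [hnone, Option.orElse]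
      · rw [PySem.Dict.get?_insert_of_ne d _ hv, List.idxOf?_cons,
          if_neg (by simpa using (Ne.symm hv))]
        cases hg : d.get? v with
        | some w => simp [Option.orElse]
        | none =>
          simp only [Option.orElse]
          cases List.idxOf? v ns <;> simp <;> push_cast <;> ring

lemma fbw_first_getD (ns : List Int) (v : Int) :
    (fbw_first ns).getD v (ns.length : Int) = (ns.idxOf v : Int) := by
  unfold fbw_first PySem.Dict.getD
  rw [fbw_first_get? ns 0 PySem.Dict.empty v, PySem.Dict.get?_empty,
    List.idxOf_eq_getD_idxOf?]
  cases hi : List.idxOf? v ns with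
  | none => simp [Option.orElse]
  | some i => simp [Option.orElse]

lemma mem_take_iff_idxOf_lt (ns : List Int) (v : Int) (k : Nat) (hk : k ≤ ns.length) :
    v ∈ ns.take k ↔ ns.idxOf v < k := by
  induction ns generalizing k with
  | nil => simp at hk; simp [hk]
  | cons y ns ih =>
    cases k with
    | zero => simp
    | succ k =>
      by_cases hv : v = y
      · subst hv
        simp [List.idxOf_cons_self]
      · rw [List.take_succ_cons, List.mem_cons, List.idxOf_cons_ne _ (Ne.symm hv)]
        simp only [hv, false_or]
        rw [ih k (by simpa using hk)]
        omega

lemma foldl_max_lt (g : Int → Int) (line : List Int) (a k : Int) :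
    (line.foldl (fun t v => max t (g v)) a < k) ↔ (a < k ∧ ∀ v ∈ line, g v < k) := by
  induction line generalizing a with
  | nil => simp
  | cons x xs ih =>
    rw [List.foldl_cons, ih]
    simp only [List.mem_cons, max_lt_iff]
    constructor
    · rintro ⟨⟨h1, h2⟩, h3⟩
      exact ⟨h1, fun v hv => by rcases hv with rfl | hv; exact h2; exact h3 v hv⟩
    · rintro ⟨h1, h2⟩
      exact ⟨⟨h1, h2 x (Or.inl rfl)⟩, fun v hv => h2 v (Or.inr hv)⟩

lemma foldl_min_lt (f : List Int → Int) (lines : List (List Int)) (a k : Int) :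
    (lines.foldl (fun best l => min best (f l)) a < k) ↔ (a < k ∨ ∃ l ∈ lines, f l < k) := by
  induction lines generalizing a with
  | nil => simp
  | cons x xs ih =>
    rw [List.foldl_cons, ih]
    simp only [List.mem_cons, min_lt_iff]
    constructor
    · rintro (h | h)
      · rcases h with h | h
        · exact Or.inl h
        · exact Or.inr ⟨x, Or.inl rfl, h⟩
      · obtain ⟨l, hl, hfl⟩ := h
        exact Or.inr ⟨l, Or.inr hl, hfl⟩
    · rintro (h | ⟨l, hl, hfl⟩)
      · exact Or.inl (Or.inl h)
      · rcases hl with rfl | hl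
        · exact Or.inl (Or.inr hfl)
        · exact Or.inr ⟨l, hl, hfl⟩

lemma foldl_min_nonneg (f : List Int → Int) (lines : List (List Int)) (a : Int) (ha : 0 ≤ a)
    (hf : ∀ l ∈ lines, 0 ≤ f l) : 0 ≤ lines.foldl (fun best l => min best (f l)) a := by
  induction lines generalizing a with
  | nil => simpa
  | cons x xs ih =>
    rw [List.foldl_cons]
    exact ih _ (le_min ha (hf x (List.mem_cons_self))) (fun l hl => hf l (List.mem_cons_of_mem _ hl))

/-- Nat-valued width: Python's `min((len(r) for r in board), default=0)`. -/
def wNat : List (List Int) → Nat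
  | [] => 0
  | r :: rs => rs.foldl (fun m row => min m row.length) r.length

lemma min?_id_int (xs : List Int) (a : Int) :
    PySem.List.min? (a :: xs) id = some (xs.foldl min a) := by
  induction xs generalizing a with
  | nil => rfl
  | cons x xs ih =>
    have h1 : PySem.List.min? (a :: x :: xs) id = PySem.List.min? (min a x :: xs) id := by
      simp only [PySem.List.min?, List.foldl_cons]
      congr 1
      dsimp only [id]
      split_ifs with hxa
      · rw [min_def, if_neg (by omega)]
      · rw [min_def, if_pos (by omega)]
    rw [h1, ih, List.foldl_cons]

lemma foldl_min_cast (rs : List (List Int)) (a : Nat) :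
    (rs.map (fun row => (row.length : Int))).foldl min (a : Int) =
      ((rs.foldl (fun m row => min m row.length) a : Nat) : Int) := by
  induction rs generalizing a with
  | nil => rfl
  | cons r rs ih =>
    rw [List.map_cons, List.foldl_cons, List.foldl_cons, ← Nat.cast_min, ih]

lemma width_eq_wNat (board : List (List Int)) :
    PySem.List.minD (board.map (fun row => (row.length : Int))) id 0 = (wNat board : Int) := by
  cases board with
  | nil => rfl
  | cons r rs =>
    rw [PySem.List.minD, List.map_cons, min?_id_int, foldl_min_cast]
    rfl

lemma foldl_min_len_le (rs : List (List Int)) (a : Nat) :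
    rs.foldl (fun m row => min m row.length) a ≤ a ∧
      ∀ row ∈ rs, rs.foldl (fun m row => min m row.length) a ≤ row.length := by
  induction rs generalizing a with
  | nil => simp
  | cons r rs ih =>
    rw [List.foldl_cons]
    obtain ⟨h1, h2⟩ := ih (min a r.length)
    refine ⟨le_trans h1 (by omega), fun row hrow => ?_⟩
    rcases List.mem_cons.mp hrow with rfl | hrow
    · exact le_trans h1 (by omega)
    · exact h2 row hrow

lemma foldl_min_len_tail (rs : List (List Int)) (a : Nat) (ha : 0 < a)
    (h : ∀ row ∈ rs, row ≠ []) :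
    (rs.map (fun row => row.tail)).foldl (fun m row => min m row.length) (a - 1) =
      rs.foldl (fun m row => min m row.length) a - 1 := by
  induction rs generalizing a with
  | nil => rfl
  | cons r rs ih =>
    rw [List.map_cons, List.foldl_cons, List.foldl_cons, List.length_tail]
    have hr : r ≠ [] := h r (List.mem_cons_self)
    have hrl : 0 < r.length := List.length_pos_iff.mpr hr
    rw [show min (a - 1) (r.length - 1) = min a r.length - 1 by omega]
    exact ih (min a r.length) (by omega) (fun row hrow => h row (List.mem_cons_of_mem _ hrow))

lemma foldl_min_len_pos (rs : List (List Int)) (a : Nat) (ha : 0 < a)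
    (h : ∀ row ∈ rs, 0 < row.length) :
    0 < rs.foldl (fun m row => min m row.length) a := by
  induction rs generalizing a with
  | nil => simpa
  | cons r rs ih =>
    rw [List.foldl_cons]
    have := h r (List.mem_cons_self)
    exact ih (min a r.length) (by omega) (fun row hrow => h row (List.mem_cons_of_mem _ hrow))

lemma getD_tail (row : List Int) (j : Nat) : row.tail.getD j 0 = row.getD (j + 1) 0 := by
  cases row <;> rfl

lemma headD_eq_getD (row : List Int) : row.headD 0 = row.getD 0 0 := by
  cases row <;> rfl

lemma transposeA_eq (board : List (List Int)) :
    transposeA board = (List.range (wNat board)).map (fun j => board.map (fun r => r.getD j 0)) := by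
  induction board using transposeA.induct with
  | case1 => simp [transposeA, wNat]
  | case2 r rs h ih =>
    rw [transposeA, dif_pos h]
    simp only [List.all_cons, Bool.and_eq_true, Bool.not_eq_eq_eq_not, Bool.not_true,
      List.isEmpty_eq_false_iff, List.all_eq_true] at h
    have hr : 0 < r.length := List.length_pos_iff.mpr h.1
    have hpos : 0 < wNat (r :: rs) :=
      foldl_min_len_pos rs r.length hr
        (fun row hrow => List.length_pos_iff.mpr (h.2 row hrow))
    have hw : wNat ((r :: rs).map (fun row => row.tail)) = wNat (r :: rs) - 1 := by
      rw [List.map_cons]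
      show (rs.map (fun row => row.tail)).foldl (fun m row => min m row.length) r.tail.length =
        wNat (r :: rs) - 1
      rw [List.length_tail]
      exact foldl_min_len_tail rs r.length hr (fun row hrow => h.2 row hrow)
    rw [ih, hw]
    obtain ⟨w, hwsucc⟩ : ∃ w, wNat (r :: rs) = w + 1 := ⟨wNat (r :: rs) - 1, by omega⟩
    rw [hwsucc]
    simp only [Nat.add_sub_cancel]
    rw [List.range_succ_eq_map]
    conv_rhs => rw [List.map_cons, List.map_map]
    have hhead : List.map (fun row => row.headD 0) (r :: rs) =
        List.map (fun row => row.getD 0 0) (r :: rs) :=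
      List.map_congr_left (fun row _ => headD_eq_getD row)
    have hcols : List.map (fun j => List.map (fun row => row.getD j 0)
          (List.map (fun row => row.tail) (r :: rs))) (List.range w) =
        List.map ((fun j => List.map (fun row => row.getD j 0) (r :: rs)) ∘ Nat.succ)
          (List.range w) := by
      refine List.map_congr_left (fun j _ => ?_)
      simp only [Function.comp, List.map_map, Nat.succ_eq_add_one]
      refine List.map_congr_left (fun row _ => ?_)
      simp only [Function.comp]
      exact getD_tail row j
    rw [hhead, hcols]
  | case3 r rs h =>
    rw [transposeA, dif_neg h]
    simp only [List.all_cons, Bool.and_eq_true, Bool.not_eq_eq_eq_not, Bool.not_true,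
      List.isEmpty_eq_false_iff, List.all_eq_true, not_and] at h
    have hex : ∃ row ∈ r :: rs, row = [] := by
      by_contra hc
      push_neg at hc
      exact h (hc r (List.mem_cons_self)) (fun row hrow => hc row (List.mem_cons_of_mem _ hrow))
    have h0 : wNat (r :: rs) = 0 := by
      obtain ⟨row, hrow, hempty⟩ := hex
      obtain ⟨h1, h2⟩ := foldl_min_len_le rs r.length
      rcases List.mem_cons.mp hrow with rfl | hrow'
      · unfold wNat
        rw [hempty] at h1 ⊢
        simpa using h1
      · unfold wNat
        have := h2 row hrow'
        rw [hempty] at this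
        simpa using this
    rw [h0]
    rfl

lemma win_time_eq (ns : List Int) (b : List (List Int)) :
    win_time (ns.length : Int) (fbw_first ns) b =
      (b ++ transposeA b).foldl
        (fun best line =>
          min best (line.foldl (fun t v => max t ((ns.idxOf v : Nat) : Int)) 0))
        (ns.length : Int) := by
  rw [win_time, width_eq_wNat, transposeA_eq]
  simp only [List.map_id', PySem.List.pyRange_zero_natCast, List.map_map]
  have hL : ((List.range (wNat b)).map
        ((fun j => b.map (fun row => PySem.List.pyGetD row j 0)) ∘ (fun k : Nat => (k : Int)))) =
      (List.range (wNat b)).map (fun j => b.map (fun r => r.getD j 0)) := by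
    refine List.map_congr_left (fun j _ => ?_)
    simp only [Function.comp]
    exact List.map_congr_left (fun row _ => by rw [PySem.List.pyGetD_natCast])
  rw [hL]
  refine PySem.List.foldl_congr_mem _ _ _ _ (fun acc line _ => ?_)
  congr 1
  refine PySem.List.foldl_congr_mem _ _ _ _ (fun t v _ => ?_)
  rw [fbw_first_getD]

lemma chk_iff_win_time (ns : List Int) (b : List (List Int)) (k : Nat) (hk1 : 1 ≤ k)
    (hk2 : k ≤ ns.length) :
    chkB ns k b = true ↔ win_time (ns.length : Int) (fbw_first ns) b < (k : Int) := by
  rw [win_time_eq, foldl_min_lt]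
  have hnk : ¬ ((ns.length : Int) < (k : Int)) := by exact_mod_cast not_lt.mpr hk2
  simp only [hnk, false_or]
  rw [chkB, check_board, List.any_eq_true]
  constructor
  · rintro ⟨line, hl, hall⟩
    refine ⟨line, hl, ?_⟩
    rw [foldl_max_lt]
    refine ⟨by exact_mod_cast hk1, fun v hv => ?_⟩
    simp only [List.all_eq_true, List.contains_iff_mem] at hall
    have := (mem_take_iff_idxOf_lt ns v k hk2).mp (hall v hv)
    exact_mod_cast this
  · rintro ⟨line, hl, hlt⟩
    rw [foldl_max_lt] at hlt
    refine ⟨line, hl, ?_⟩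
    simp only [List.all_eq_true, List.contains_iff_mem]
    intro v hv
    exact (mem_take_iff_idxOf_lt ns v k hk2).mpr (by exact_mod_cast hlt.2 v hv)

lemma win_time_nonneg (ns : List Int) (b : List (List Int)) :
    0 ≤ win_time (ns.length : Int) (fbw_first ns) b := by
  rw [win_time_eq]
  refine foldl_min_nonneg _ _ _ (by positivity) (fun l _ => ?_)
  exact (PySem.List.le_foldl_max (l.map (fun v => ((ns.idxOf v : Nat) : Int))) 0).1.trans
    (le_of_eq (by rw [List.foldl_map]))

lemma winsAt_iff_win_time (ns : List Int) (b : List (List Int)) {j : Nat} (hj : j < ns.length) :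
    winsAtB ns j b = true ↔ win_time (ns.length : Int) (fbw_first ns) b = (j : Int) := by
  have hnn := win_time_nonneg ns b
  have h1 := chk_iff_win_time ns b (j + 1) (by omega) (by omega)
  simp only [winsAtB, Bool.and_eq_true, Bool.or_eq_true, beq_iff_eq, Bool.not_eq_true']
  by_cases h0 : j = 0
  · subst h0
    simp only [Nat.cast_zero, Nat.cast_one] at h1 ⊢
    constructor
    · rintro ⟨hc, _⟩
      have := h1.mp hc
      omega
    · intro h
      exact ⟨h1.mpr (by omega), by simp⟩
  · have h2 := chk_iff_win_time ns b j (by omega) (by omega)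
    constructor
    · rintro ⟨hc, hor⟩
      rcases hor with hz | hne
      · exact absurd hz h0
      · have ha := h1.mp hc
        have hb : ¬ (win_time (ns.length : Int) (fbw_first ns) b < (j : Int)) := by
          intro hlt
          exact absurd (h2.mpr hlt) (by simp [hne])
        push_cast at ha hb ⊢
        omega
    · intro h
      refine ⟨h1.mpr (by push_cast; omega), Or.inr ?_⟩
      rcases Bool.eq_false_or_eq_true (chkB ns j b) with ht | hf
      · exfalso
        have := h2.mp ht
        omega
      · exact hf

lemma buckets_get? (ns : List Int) (bs : List (List (List Int)))
    (d : PySem.Dict Int (List (List (List Int)))) (t : Int) (ht : t < (ns.length : Int)) :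
    ((bs.foldl
        (fun buckets board =>
          let tb := win_time (ns.length : Int) (fbw_first ns) board
          if tb < (ns.length : Int) then buckets.modify tb [] (fun l => l ++ [board]) else buckets)
        d).get? t) =
      (if bs.filter (fun b => win_time (ns.length : Int) (fbw_first ns) b == t) = []
        then d.get? t
        else some (d.getD t [] ++
          bs.filter (fun b => win_time (ns.length : Int) (fbw_first ns) b == t))) := by
  induction bs generalizing d with
  | nil => simp
  | cons b bs ih =>
    rw [List.foldl_cons, List.filter_cons]
    dsimp only
    by_cases h2 : win_time (ns.length : Int) (fbw_first ns) b = t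
    · have hcond : win_time (ns.length : Int) (fbw_first ns) b < (ns.length : Int) := by
        rw [h2]; exact ht
      have hbeq : (win_time (ns.length : Int) (fbw_first ns) b == t) = true := by simp [h2]
      rw [if_pos hcond, if_pos hbeq, if_neg (List.cons_ne_nil _ _)]
      have hmod : PySem.Dict.modify d (win_time (ns.length : Int) (fbw_first ns) b) []
          (fun l => l ++ [b]) = d.insert t (d.getD t [] ++ [b]) := by
        rw [PySem.Dict.modify, h2]
      rw [hmod, ih]
      by_cases hrest : bs.filter (fun b => win_time (ns.length : Int) (fbw_first ns) b == t) = []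
      · rw [if_pos hrest, hrest, PySem.Dict.get?_insert_self]
      · rw [if_neg hrest, PySem.Dict.getD_insert_self]
        simp
    · have hbeq : (win_time (ns.length : Int) (fbw_first ns) b == t) = false := by simp [h2]
      rw [hbeq]
      simp only [Bool.false_eq_true, if_false]
      by_cases h1 : win_time (ns.length : Int) (fbw_first ns) b < (ns.length : Int)
      · rw [if_pos h1, PySem.Dict.modify, ih]
        have hne' : t ≠ win_time (ns.length : Int) (fbw_first ns) b := fun hh => h2 hh.symm
        rw [PySem.Dict.get?_insert_of_ne _ _ hne', PySem.Dict.getD_insert_of_ne _ _ _ hne']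
      · rw [if_neg h1, ih]

lemma dict_getD_empty (t : Int) : (PySem.Dict.empty : PySem.Dict Int (List (List (List Int)))).getD t [] = [] := by
  rw [PySem.Dict.getD, PySem.Dict.get?_empty]
  rfl

lemma B_eq_canonW (ns : List Int) (boards : List (List (List Int))) :
    find_bingo_winner_alt ns boards =
      (List.range ns.length).flatMap (fun (t : Nat) =>
        (boards.filter (fun b => win_time (ns.length : Int) (fbw_first ns) b == (t : Int))).map
          (fun b => (ns.take (t + 1), b))) := by
  simp only [find_bingo_winner_alt]
  rw [PySem.List.pyRange_zero_natCast, List.foldl_map]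
  refine Eq.trans (PySem.List.foldl_congr_mem _ _
    (fun (result : List (List Int × List (List Int))) (t : Nat) =>
      result ++
        (boards.filter (fun b => win_time (ns.length : Int) (fbw_first ns) b == (t : Int))).map
          (fun b => (ns.take (t + 1), b))) _ (fun acc t ht => ?_)) ?_
  · have ht' : ((t : Int)) < (ns.length : Int) := by
      exact_mod_cast List.mem_range.mp ht
    rw [buckets_get? ns boards PySem.Dict.empty (t : Int) ht']
    by_cases hf : boards.filter
        (fun b => win_time (ns.length : Int) (fbw_first ns) b == (t : Int)) = []
    · rw [if_pos hf, PySem.Dict.get?_empty]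
      simp [hf]
    · rw [if_neg hf, dict_getD_empty, List.nil_append]
      have hne : (boards.filter
          (fun b => win_time (ns.length : Int) (fbw_first ns) b == (t : Int))).isEmpty = false := by
        simp [List.isEmpty_iff, hf]
      dsimp only
      rw [hne]
      simp only [Bool.false_eq_true, if_false]
      refine congrArg (fun z => acc ++ z) (List.map_congr_left (fun b _ => ?_))
      rw [show ((t : Int) + 1) = (((t + 1 : Nat)) : Int) by push_cast; ring,
        PySem.List.slice_to_natCast]
  · rw [PySem.List.foldl_append_eq_flatMap, List.nil_append]

-- ===== VERDICT (by name: the statement is the Claim_ definition above) =====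
theorem find_bingo_winner_spec : Claim_equal_find_bingo_winner := by
  intro ns boards _
  show find_bingo_winner ns boards = find_bingo_winner_alt ns boards
  rw [A_eq_canonC, B_eq_canonW, canonC]
  refine List.flatMap_congr (fun j hj => ?_)
  have hj' : j < ns.length := List.mem_range.mp hj
  rw [List.filter_congr (fun b _ => ?_)]
  have hiff := winsAt_iff_win_time ns b hj'
  cases hw : winsAtB ns j b
  · rw [hw] at hiff
    symm
    simp only [beq_eq_false_iff_ne, ne_eq, beq_iff_eq]
    intro hc
    exact Bool.false_ne_true (hiff.mpr hc)
  · exact ((beq_iff_eq.mpr (hiff.mp hw)).symm)
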